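-- pv_equiv track=rewrite | github.com/kmaterna/cubbie | choose_reference_pixel.py | pick_reference_pixel
-- ===== SOURCE A (Python) =====
-- def pick_reference_pixel(range_bounds, azimuth_bounds, number_of_datas, maxnum):
-- 	xref=0;
-- 	yref=0;
-- 	counting_maxnum=0;
-- 	for i in range(range_bounds[0], range_bounds[1]):
-- 		for j in range(azimuth_bounds[0], azimuth_bounds[1]):
-- 			counting_maxnum=max(counting_maxnum, number_of_datas[i][j]);
-- 			if number_of_datas[i][j]==maxnum:
-- 				xref=i;
-- 				yref=j;
-- 				return [xref, yref];
-- 	if xref==0 and yref==0: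
-- 		for i in range(range_bounds[0], range_bounds[1]):
-- 			for j in range(azimuth_bounds[0], azimuth_bounds[1]):
-- 				if number_of_datas[i][j]==counting_maxnum:
-- 					xref=i;
-- 					yref=j;
-- 					return [xref, yref];
-- 	return [xref, yref];
-- ===== SOURCE B (Python) =====
-- def pick_reference_pixel(range_bounds, azimuth_bounds, number_of_datas, maxnum):
--     counting_maxnum = 0
--     best = None        # first cell whose value strictly exceeds every earlier value
--     first_zero = None  # first cell with value 0 (needed when the grid max is <= 0)
--     for i in range(range_bounds[0], range_bounds[1]):
--         for j in range(azimuth_bounds[0], azimuth_bounds[1]):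
--             v = number_of_datas[i][j]
--             if v == maxnum:
--                 return [i, j]
--             if v > counting_maxnum:
--                 counting_maxnum = v
--                 best = [i, j]
--             if v == 0 and first_zero is None:
--                 first_zero = [i, j]
--     if best is not None:
--         return best
--     if first_zero is not None:
--         return first_zero
--     return [0, 0]
-- ===== Notes on version B (the rewrite author's own statement) =====
-- stated objective: alternative
-- what changed: B fuses A's two row-major scans into one pass that tracks the first strictly-greater cell (= first cell attaining the positive global max) and the first zero cell, instead of rescanning the grid for the first cell equal to the max.
-- outside the precondition, e.g. on pick_reference_pixel([0, 2], [0, 1], [[5]], 5): A returns [0, 0], B returns [0, 0]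
import Mathlib
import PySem

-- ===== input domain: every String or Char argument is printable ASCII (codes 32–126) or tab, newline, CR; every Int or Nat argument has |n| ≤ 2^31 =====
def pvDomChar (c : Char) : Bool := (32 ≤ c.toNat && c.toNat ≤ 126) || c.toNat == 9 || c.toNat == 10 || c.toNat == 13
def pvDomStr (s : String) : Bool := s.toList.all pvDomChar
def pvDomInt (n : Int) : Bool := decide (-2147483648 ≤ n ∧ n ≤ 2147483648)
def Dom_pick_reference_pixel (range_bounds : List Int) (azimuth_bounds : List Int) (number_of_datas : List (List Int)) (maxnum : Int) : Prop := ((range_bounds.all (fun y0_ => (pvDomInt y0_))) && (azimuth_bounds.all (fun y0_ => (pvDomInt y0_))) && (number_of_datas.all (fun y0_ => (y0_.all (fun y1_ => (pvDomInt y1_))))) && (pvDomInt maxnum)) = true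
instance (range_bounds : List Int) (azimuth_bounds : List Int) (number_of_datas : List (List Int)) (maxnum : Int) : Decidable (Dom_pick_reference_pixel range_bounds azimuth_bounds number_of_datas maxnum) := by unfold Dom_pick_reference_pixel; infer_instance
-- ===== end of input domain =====

-- B fuses A's two row-major scans into one pass (tracking the first strictly-greater cell and the
-- first zero cell); equivalence of the returned value is proved on Pre_ (all grid accesses in range).

-- number_of_datas[i][j]; the defaults are only reachable outside Pre_
def pvCell (nod : List (List Int)) (i j : Int) : Int :=
  (PySem.List.pyGet? ((PySem.List.pyGet? nod i).getD []) j).getD 0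

-- ===== PORT A =====
-- inner 'for j' loop of A's first scan: threads counting_maxnum, early-returns on == maxnum
def aInner (nod : List (List Int)) (maxnum i : Int) : List Int → Int → Int × Option (Int × Int)
  | [], cm => (cm, none)
  | j :: js, cm =>
      let v := pvCell nod i j
      let cm' := max cm v
      if v = maxnum then (cm', some (i, j)) else aInner nod maxnum i js cm'

-- outer 'for i' loop of A's first scan
def aOuter (nod : List (List Int)) (maxnum : Int) (js : List Int) : List Int → Int → Int × Option (Int × Int)
  | [], cm => (cm, none)
  | i :: is, cm =>
      match aInner nod maxnum i js cm with
      | (cm', some p) => (cm', some p)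
      | (cm', none) => aOuter nod maxnum js is cm'

-- inner 'for j' loop of A's second scan: first cell equal to counting_maxnum
def aInner2 (nod : List (List Int)) (cm i : Int) : List Int → Option (Int × Int)
  | [] => none
  | j :: js => if pvCell nod i j = cm then some (i, j) else aInner2 nod cm i js

-- outer 'for i' loop of A's second scan
def aOuter2 (nod : List (List Int)) (cm : Int) (js : List Int) : List Int → Option (Int × Int)
  | [] => none
  | i :: is =>
      match aInner2 nod cm i js with
      | some p => some p
      | none => aOuter2 nod cm js is

def pick_reference_pixel (range_bounds : List Int) (azimuth_bounds : List Int) (number_of_datas : List (List Int)) (maxnum : Int) : List Int :=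
  let is := PySem.List.pyRange ((PySem.List.pyGet? range_bounds 0).getD 0) ((PySem.List.pyGet? range_bounds 1).getD 0) 1
  let js := PySem.List.pyRange ((PySem.List.pyGet? azimuth_bounds 0).getD 0) ((PySem.List.pyGet? azimuth_bounds 1).getD 0) 1
  match aOuter number_of_datas maxnum js is 0 with
  | (_, some (x, y)) => [x, y]
  | (cm, none) =>
      -- here xref == 0 and yref == 0 always holds in A, so the second scan runs
      match aOuter2 number_of_datas cm js is with
      | some (x, y) => [x, y]
      | none => [0, 0]

-- ===== PORT B =====
-- state: (counting_maxnum, best, first_zero)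
def bInner (nod : List (List Int)) (maxnum i : Int) : List Int → Int × Option (Int × Int) × Option (Int × Int) → Option (Int × Int) × (Int × Option (Int × Int) × Option (Int × Int))
  | [], st => (none, st)
  | j :: js, (cm, best, fz) =>
      let v := pvCell nod i j
      if v = maxnum then (some (i, j), (cm, best, fz))
      else
        let cm' := if v > cm then v else cm
        let best' := if v > cm then some (i, j) else best
        let fz' := if v = 0 ∧ fz = none then some (i, j) else fz
        bInner nod maxnum i js (cm', best', fz')

def bOuter (nod : List (List Int)) (maxnum : Int) (js : List Int) : List Int → Int × Option (Int × Int) × Option (Int × Int) → Option (Int × Int) × (Int × Option (Int × Int) × Option (Int × Int))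
  | [], st => (none, st)
  | i :: is, st =>
      match bInner nod maxnum i js st with
      | (some p, st') => (some p, st')
      | (none, st') => bOuter nod maxnum js is st'

def pick_reference_pixel_alt (range_bounds : List Int) (azimuth_bounds : List Int) (number_of_datas : List (List Int)) (maxnum : Int) : List Int :=
  let is := PySem.List.pyRange ((PySem.List.pyGet? range_bounds 0).getD 0) ((PySem.List.pyGet? range_bounds 1).getD 0) 1
  let js := PySem.List.pyRange ((PySem.List.pyGet? azimuth_bounds 0).getD 0) ((PySem.List.pyGet? azimuth_bounds 1).getD 0) 1
  match bOuter number_of_datas maxnum js is (0, none, none) with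
  | (some (x, y), _) => [x, y]
  | (none, (_, best, fz)) =>
      match best with
      | some (x, y) => [x, y]
      | none =>
          match fz with
          | some (x, y) => [x, y]
          | none => [0, 0]

-- ===== PRECONDITION & SPEC =====
-- Pre_ excludes the inputs on which A's full scan raises IndexError (bounds lists shorter than 2, or a
-- scanned cell index out of range); since the early 'return' may fire before a bad access, this also
-- excludes some inputs on which both programs return the same early result (see claim cites).
def Pre_pick_reference_pixel (range_bounds : List Int) (azimuth_bounds : List Int) (number_of_datas : List (List Int)) (maxnum : Int) : Prop :=
  2 ≤ range_bounds.length ∧ 2 ≤ azimuth_bounds.length ∧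
  ((PySem.List.pyGet? range_bounds 1).getD 0 ≤ (PySem.List.pyGet? range_bounds 0).getD 0 ∨
   (PySem.List.pyGet? azimuth_bounds 1).getD 0 ≤ (PySem.List.pyGet? azimuth_bounds 0).getD 0 ∨
   (-(number_of_datas.length : Int) ≤ (PySem.List.pyGet? range_bounds 0).getD 0 ∧
    (PySem.List.pyGet? range_bounds 1).getD 0 ≤ (number_of_datas.length : Int) ∧
    ∀ i ∈ PySem.List.pyRange ((PySem.List.pyGet? range_bounds 0).getD 0) ((PySem.List.pyGet? range_bounds 1).getD 0) 1,
      -((((PySem.List.pyGet? number_of_datas i).getD []).length : Int)) ≤ (PySem.List.pyGet? azimuth_bounds 0).getD 0 ∧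
      (PySem.List.pyGet? azimuth_bounds 1).getD 0 ≤ ((((PySem.List.pyGet? number_of_datas i).getD []).length : Int))))
instance (range_bounds : List Int) (azimuth_bounds : List Int) (number_of_datas : List (List Int)) (maxnum : Int) : Decidable (Pre_pick_reference_pixel range_bounds azimuth_bounds number_of_datas maxnum) := by unfold Pre_pick_reference_pixel; infer_instance

def pvWitness_pick_reference_pixel : List Int × List Int × List (List Int) × Int :=
  ([0, 2], [0, 2], [[1, 2], [3, 4]], 5)

def Spec_pick_reference_pixel (range_bounds : List Int) (azimuth_bounds : List Int) (number_of_datas : List (List Int)) (maxnum : Int) (out : List Int) : Prop := out = pick_reference_pixel_alt range_bounds azimuth_bounds number_of_datas maxnum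
instance (range_bounds : List Int) (azimuth_bounds : List Int) (number_of_datas : List (List Int)) (maxnum : Int) (out : List Int) : Decidable (Spec_pick_reference_pixel range_bounds azimuth_bounds number_of_datas maxnum out) := by unfold Spec_pick_reference_pixel; infer_instance

-- ===== CLAIM (what is proved, stated in full; the proofs are below) =====
def Claim_equal_pick_reference_pixel : Prop := ∀ (range_bounds : List Int) (azimuth_bounds : List Int) (number_of_datas : List (List Int)) (maxnum : Int), Dom_pick_reference_pixel range_bounds azimuth_bounds number_of_datas maxnum → Pre_pick_reference_pixel range_bounds azimuth_bounds number_of_datas maxnum → Spec_pick_reference_pixel range_bounds azimuth_bounds number_of_datas maxnum (pick_reference_pixel range_bounds azimuth_bounds number_of_datas maxnum)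

-- ===== LEMMAS AND PROOFS =====

-- flattened cell sequence of the double loop
def pvFlat (js : List Int) (is : List Int) : List (Int × Int) :=
  is.flatMap (fun i => js.map (fun j => (i, j)))

-- flat versions of the loops
def aFlat (nod : List (List Int)) (maxnum : Int) : List (Int × Int) → Int → Int × Option (Int × Int)
  | [], cm => (cm, none)
  | p :: ps, cm =>
      let v := pvCell nod p.1 p.2
      let cm' := max cm v
      if v = maxnum then (cm', some p) else aFlat nod maxnum ps cm'

def bFlat (nod : List (List Int)) (maxnum : Int) : List (Int × Int) → Int × Option (Int × Int) × Option (Int × Int) → Option (Int × Int) × (Int × Option (Int × Int) × Option (Int × Int))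
  | [], st => (none, st)
  | p :: ps, (cm, best, fz) =>
      let v := pvCell nod p.1 p.2
      if v = maxnum then (some p, (cm, best, fz))
      else bFlat nod maxnum ps
        (if v > cm then v else cm, if v > cm then some p else best,
         if v = 0 ∧ fz = none then some p else fz)


-- a cell-value predicate, shared by the characterisations
def pvEq (nod : List (List Int)) (t : Int) (p : Int × Int) : Bool := pvCell nod p.1 p.2 == t

def pvMax (nod : List (List Int)) (L : List (Int × Int)) (cm : Int) : Int :=
  L.foldl (fun c p => max c (pvCell nod p.1 p.2)) cm

lemma le_pvMax (nod : List (List Int)) : ∀ (L : List (Int × Int)) (cm : Int), cm ≤ pvMax nod L cm := by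
  intro L
  induction L with
  | nil => intro cm; simp [pvMax]
  | cons p ps ih =>
      intro cm
      have h := ih (max cm (pvCell nod p.1 p.2))
      simp only [pvMax, List.foldl_cons] at *
      omega

lemma pvMax_mem (nod : List (List Int)) : ∀ (L : List (Int × Int)) (cm : Int),
    pvMax nod L cm = cm ∨ ∃ p ∈ L, pvCell nod p.1 p.2 = pvMax nod L cm := by
  intro L
  induction L with
  | nil => intro cm; simp [pvMax]
  | cons p ps ih =>
      intro cm
      have h := ih (max cm (pvCell nod p.1 p.2))
      simp only [pvMax, List.foldl_cons] at *
      rcases h with h | ⟨q, hq, hv⟩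
      · by_cases hc : pvCell nod p.1 p.2 ≤ cm
        · left; omega
        · right; exact ⟨p, List.mem_cons_self, by omega⟩
      · right; exact ⟨q, List.mem_cons_of_mem _ hq, hv⟩

-- ---- port A characterisations ----

lemma aInner_eq_flat (nod : List (List Int)) (maxnum i : Int) : ∀ (js : List Int) (cm : Int),
    aInner nod maxnum i js cm = aFlat nod maxnum (js.map (fun j => (i, j))) cm := by
  intro js
  induction js with
  | nil => intro cm; simp [aInner, aFlat]
  | cons j js ih => intro cm; simp [aInner, aFlat, ih]

lemma aFlat_append (nod : List (List Int)) (maxnum : Int) : ∀ (L1 L2 : List (Int × Int)) (cm : Int),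
    aFlat nod maxnum (L1 ++ L2) cm =
      match aFlat nod maxnum L1 cm with
      | (cm', none) => aFlat nod maxnum L2 cm'
      | r => r := by
  intro L1
  induction L1 with
  | nil => intro L2 cm; simp [aFlat]
  | cons p ps ih =>
      intro L2 cm
      simp only [List.cons_append, aFlat]
      split_ifs with h
      · rfl
      · exact ih L2 _

lemma aOuter_eq_flat (nod : List (List Int)) (maxnum : Int) (js : List Int) : ∀ (is : List Int) (cm : Int),
    aOuter nod maxnum js is cm = aFlat nod maxnum (pvFlat js is) cm := by
  intro is
  induction is with
  | nil => intro cm; simp [aOuter, aFlat, pvFlat]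
  | cons i is ih =>
      intro cm
      simp only [aOuter, pvFlat, List.flatMap_cons, aFlat_append, aInner_eq_flat]
      cases h : aFlat nod maxnum (js.map (fun j => (i, j))) cm with
      | mk cm' r =>
          cases r with
          | none => simpa [pvFlat] using ih cm'
          | some p => rfl

lemma aInner2_eq_find (nod : List (List Int)) (cm i : Int) : ∀ (js : List Int),
    aInner2 nod cm i js = (js.map (fun j => (i, j))).find? (pvEq nod cm) := by
  intro js
  induction js with
  | nil => simp [aInner2]
  | cons j js ih =>
      by_cases h : pvEq nod cm (i, j) = true
      · have hv : pvCell nod i j = cm := by simpa [pvEq] using h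
        rw [List.map_cons, List.find?_cons_of_pos h]
        simp [aInner2, hv]
      · have hv : ¬ pvCell nod i j = cm := by simpa [pvEq] using h
        rw [List.map_cons, List.find?_cons_of_neg (by simpa using h), ← ih]
        simp [aInner2, hv]

lemma aOuter2_eq_find (nod : List (List Int)) (cm : Int) (js : List Int) : ∀ (is : List Int),
    aOuter2 nod cm js is = (pvFlat js is).find? (pvEq nod cm) := by
  intro is
  induction is with
  | nil => simp [aOuter2, pvFlat]
  | cons i is ih =>
      simp only [aOuter2, pvFlat, List.flatMap_cons, List.find?_append, aInner2_eq_find]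
      cases h : (js.map (fun j => (i, j))).find? (pvEq nod cm) with
      | none => simpa [pvFlat, Option.or] using ih
      | some p => simp [Option.or]

lemma aFlat_of_find_none (nod : List (List Int)) (maxnum : Int) : ∀ (L : List (Int × Int)) (cm : Int),
    L.find? (pvEq nod maxnum) = none →
    aFlat nod maxnum L cm = (pvMax nod L cm, none) := by
  intro L
  induction L with
  | nil => intro cm _; simp [aFlat, pvMax]
  | cons p ps ih =>
      intro cm h
      rw [List.find?_eq_none] at h
      have h1 := h p List.mem_cons_self
      have h2 : ps.find? (pvEq nod maxnum) = none :=
        List.find?_eq_none.mpr (fun x hx => h x (List.mem_cons_of_mem _ hx))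
      have hne : ¬ pvCell nod p.1 p.2 = maxnum := by
        simpa [pvEq] using h1
      simp only [aFlat, hne, if_false, pvMax, List.foldl_cons]
      exact ih _ h2

lemma aFlat_of_find_some (nod : List (List Int)) (maxnum : Int) : ∀ (L : List (Int × Int)) (cm : Int) (q : Int × Int),
    L.find? (pvEq nod maxnum) = some q →
    (aFlat nod maxnum L cm).2 = some q := by
  intro L
  induction L with
  | nil => intro cm q h; simp at h
  | cons p ps ih =>
      intro cm q h
      by_cases hp : pvEq nod maxnum p = true
      · rw [List.find?_cons_of_pos hp] at h
        have hv : pvCell nod p.1 p.2 = maxnum := by simpa [pvEq] using hp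
        simp [aFlat, hv, ← h]
      · rw [List.find?_cons_of_neg hp] at h
        have hv : ¬ pvCell nod p.1 p.2 = maxnum := by simpa [pvEq] using hp
        simp only [aFlat, hv, if_false]
        exact ih _ q h

-- ---- port B characterisations ----

lemma bInner_eq_flat (nod : List (List Int)) (maxnum i : Int) : ∀ (js : List Int) (st : Int × Option (Int × Int) × Option (Int × Int)),
    bInner nod maxnum i js st = bFlat nod maxnum (js.map (fun j => (i, j))) st := by
  intro js
  induction js with
  | nil => intro st; simp [bInner, bFlat]
  | cons j js ih =>
      intro st
      obtain ⟨cm, best, fz⟩ := st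
      simp only [bInner, bFlat, List.map_cons]
      by_cases h : pvCell nod i j = maxnum
      · simp [h]
      · simp only [if_neg h]
        exact ih _

lemma bFlat_append (nod : List (List Int)) (maxnum : Int) : ∀ (L1 L2 : List (Int × Int)) (st : Int × Option (Int × Int) × Option (Int × Int)),
    bFlat nod maxnum (L1 ++ L2) st =
      match bFlat nod maxnum L1 st with
      | (none, st') => bFlat nod maxnum L2 st'
      | r => r := by
  intro L1
  induction L1 with
  | nil => intro L2 st; simp [bFlat]
  | cons p ps ih =>
      intro L2 st
      obtain ⟨cm, best, fz⟩ := st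
      simp only [List.cons_append, bFlat]
      by_cases h : pvCell nod p.1 p.2 = maxnum
      · simp [h]
      · simp only [if_neg h]
        exact ih L2 _

lemma bOuter_eq_flat (nod : List (List Int)) (maxnum : Int) (js : List Int) : ∀ (is : List Int) (st : Int × Option (Int × Int) × Option (Int × Int)),
    bOuter nod maxnum js is st = bFlat nod maxnum (pvFlat js is) st := by
  intro is
  induction is with
  | nil => intro st; simp [bOuter, bFlat, pvFlat]
  | cons i is ih =>
      intro st
      simp only [bOuter, pvFlat, List.flatMap_cons, bFlat_append, bInner_eq_flat]
      cases h : bFlat nod maxnum (js.map (fun j => (i, j))) st with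
      | mk r st' =>
          cases r with
          | none => simpa [pvFlat] using ih st'
          | some p => rfl

lemma bFlat_of_find_some (nod : List (List Int)) (maxnum : Int) : ∀ (L : List (Int × Int)) (st : Int × Option (Int × Int) × Option (Int × Int)) (q : Int × Int),
    L.find? (pvEq nod maxnum) = some q →
    (bFlat nod maxnum L st).1 = some q := by
  intro L
  induction L with
  | nil => intro st q h; simp at h
  | cons p ps ih =>
      intro st q h
      obtain ⟨cm, best, fz⟩ := st
      by_cases hp : pvEq nod maxnum p = true
      · rw [List.find?_cons_of_pos hp] at h
        have hv : pvCell nod p.1 p.2 = maxnum := by simpa [pvEq] using hp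
        simp [bFlat, hv, ← h]
      · rw [List.find?_cons_of_neg hp] at h
        have hv : ¬ pvCell nod p.1 p.2 = maxnum := by simpa [pvEq] using hp
        simp only [bFlat, hv, if_false]
        exact ih _ q h

lemma bFlat_of_find_none (nod : List (List Int)) (maxnum : Int) : ∀ (L : List (Int × Int)) (cm : Int) (best fz : Option (Int × Int)),
    L.find? (pvEq nod maxnum) = none →
    bFlat nod maxnum L (cm, best, fz) =
      (none,
       (pvMax nod L cm,
        (if pvMax nod L cm ≤ cm then best else L.find? (pvEq nod (pvMax nod L cm))),
        (match fz with
         | some z => some z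
         | none => L.find? (pvEq nod 0)))) := by
  intro L
  induction L with
  | nil =>
      intro cm best fz _
      cases fz <;> simp [bFlat, pvMax]
  | cons p ps ih =>
      intro cm best fz h
      rw [List.find?_eq_none] at h
      have h1 := h p List.mem_cons_self
      have h2 : ps.find? (pvEq nod maxnum) = none :=
        List.find?_eq_none.mpr (fun x hx => h x (List.mem_cons_of_mem _ hx))
      have hne : ¬ pvCell nod p.1 p.2 = maxnum := by simpa [pvEq] using h1
      have hM : pvMax nod (p :: ps) cm = pvMax nod ps (max cm (pvCell nod p.1 p.2)) := by
        simp [pvMax]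
      have hle := le_pvMax nod ps (max cm (pvCell nod p.1 p.2))
      have hif : (if pvCell nod p.1 p.2 > cm then pvCell nod p.1 p.2 else cm) = max cm (pvCell nod p.1 p.2) := by
        split <;> omega
      simp only [bFlat, hne, if_false, hif]
      rw [ih _ _ _ h2, hM]
      refine Prod.ext rfl (Prod.ext rfl (Prod.ext ?_ ?_))
      · -- best component
        set v := pvCell nod p.1 p.2 with hv
        set M := pvMax nod ps (max cm v) with hMdef
        by_cases hMv : M ≤ max cm v
        · by_cases hgt : v > cm
          · have hc : ¬ M ≤ cm := by omega
            have hpp : pvEq nod M p = true := by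
              simp only [pvEq, beq_iff_eq, ← hv]; omega
            rw [if_pos hMv, if_pos hgt, if_neg hc, List.find?_cons_of_pos hpp]
          · have hc : M ≤ cm := by omega
            rw [if_pos hMv, if_neg hgt, if_pos hc]
        · have hc : ¬ M ≤ cm := by omega
          have hpp : ¬ pvEq nod M p = true := by
            simp only [pvEq, beq_iff_eq, ← hv]; omega
          rw [if_neg hMv, if_neg hc, List.find?_cons_of_neg hpp]
      · -- first_zero component
        set v := pvCell nod p.1 p.2 with hv
        cases fz with
        | some z =>
            have hb : ¬ (v = 0 ∧ (some z : Option (Int × Int)) = none) := by simp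
            rw [if_neg hb]
        | none =>
            by_cases hz : v = 0
            · have hb : (v = 0 ∧ (none : Option (Int × Int)) = none) := ⟨hz, rfl⟩
              rw [if_pos hb]
              have hpp : pvEq nod 0 p = true := by simp [pvEq, ← hv, hz]
              rw [List.find?_cons_of_pos hpp]
            · have hb : ¬ (v = 0 ∧ (none : Option (Int × Int)) = none) := by simp [hz]
              rw [if_neg hb]
              have hpp : ¬ pvEq nod 0 p = true := by
                simp only [pvEq, beq_iff_eq, ← hv]; exact hz
              rw [List.find?_cons_of_neg hpp]

-- ===== VERDICT (by name: the statement is the Claim_ definition above) =====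
theorem pick_reference_pixel_spec : Claim_equal_pick_reference_pixel := by
  intro rb ab nod maxnum _ _
  unfold Spec_pick_reference_pixel pick_reference_pixel pick_reference_pixel_alt
  simp only []
  set is := PySem.List.pyRange ((PySem.List.pyGet? rb 0).getD 0) ((PySem.List.pyGet? rb 1).getD 0) 1 with his
  set js := PySem.List.pyRange ((PySem.List.pyGet? ab 0).getD 0) ((PySem.List.pyGet? ab 1).getD 0) 1 with hjs
  simp only [aOuter_eq_flat, bOuter_eq_flat, aOuter2_eq_find]
  set L := pvFlat js is with hL
  cases hfind : L.find? (pvEq nod maxnum) with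
  | some q =>
      obtain ⟨x, y⟩ := q
      cases hA : aFlat nod maxnum L 0 with
      | mk cm r =>
          have h1 : r = some (x, y) := by
            have := aFlat_of_find_some nod maxnum L 0 (x, y) hfind
            rw [hA] at this; exact this
          cases hB : bFlat nod maxnum L (0, none, none) with
          | mk r' st' =>
              have h2 : r' = some (x, y) := by
                have := bFlat_of_find_some nod maxnum L (0, none, none) (x, y) hfind
                rw [hB] at this; exact this
              subst h1 h2
              rfl
  | none =>
      rw [aFlat_of_find_none nod maxnum L 0 hfind, bFlat_of_find_none nod maxnum L 0 none none hfind]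
      have h0 : (0 : Int) ≤ pvMax nod L 0 := le_pvMax nod L 0
      by_cases hM : pvMax nod L 0 ≤ 0
      · have hMeq : pvMax nod L 0 = 0 := le_antisymm hM h0
        rw [hMeq]
        simp
      · simp only [if_neg hM]
        have hmem : ∃ p ∈ L, pvCell nod p.1 p.2 = pvMax nod L 0 := by
          rcases pvMax_mem nod L 0 with h | h
          · omega
          · exact h
        obtain ⟨p, hp, hv⟩ := hmem
        have hsome : (L.find? (pvEq nod (pvMax nod L 0))).isSome := by
          rw [List.find?_isSome]
          exact ⟨p, hp, by simp [pvEq, hv]⟩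
        cases h2 : L.find? (pvEq nod (pvMax nod L 0)) with
        | none => rw [h2] at hsome; simp at hsome
        | some q => obtain ⟨x, y⟩ := q; simp
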